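-- pv_equiv track=rewrite | github.com/assert-justice/aoc_rs | 2025/d5/temp.py | parse
-- ===== SOURCE A (Python) =====
-- def parse(s: str):
--     lines = s.splitlines()
--     blank_found = False
--     ranges = []
--     ingredients = []
--     for line in lines:
--         if len(line) == 0:
--             blank_found = True
--             continue
--         if blank_found:
--             ingredients.append(int(line))
--         else:
--             ranges.append([int(n) for n in line.split("-")])
--     return ranges, ingredients
-- ===== SOURCE B (Python) =====
-- def parse(s: str):
--     lines = s.splitlines()
--     try:
--         i = lines.index("")
--         before, after = lines[:i], lines[i + 1:]
--     except ValueError: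
--         before, after = lines, []
--     ranges = [[int(n) for n in line.split("-")] for line in before]
--     ingredients = [int(line) for line in after if line]
--     return ranges, ingredients
-- ===== Notes on version B (the rewrite author's own statement) =====
-- stated objective: simpler
-- what changed: replaces the single stateful loop with a sticky blank-found flag by first locating the first blank line (list.index with a ValueError fallback), slicing the lines into the two sections, and building ranges and ingredients with two comprehensions
import Mathlib
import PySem

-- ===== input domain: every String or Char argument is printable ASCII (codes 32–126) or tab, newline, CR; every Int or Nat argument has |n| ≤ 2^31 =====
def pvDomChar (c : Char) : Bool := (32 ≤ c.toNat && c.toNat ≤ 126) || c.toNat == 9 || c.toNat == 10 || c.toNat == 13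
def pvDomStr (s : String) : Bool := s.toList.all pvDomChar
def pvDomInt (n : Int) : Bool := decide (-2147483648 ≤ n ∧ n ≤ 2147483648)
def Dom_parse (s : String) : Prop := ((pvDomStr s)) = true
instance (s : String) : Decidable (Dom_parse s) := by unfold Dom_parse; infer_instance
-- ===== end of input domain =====

-- B computes the first-blank split point and builds the two sections by slicing + comprehensions,
-- instead of A's single loop with a sticky blank-found flag (objective: simpler).

-- ===== PORT A =====
-- loop state: (blank_found, ranges, ingredients); none = a ValueError from int() has occurred
def parseAStep (st : Option (Bool × List (List Int) × List Int)) (line : String) :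
    Option (Bool × List (List Int) × List Int) :=
  st.bind fun (b, rs, is) =>
    if PySem.Str.len line = 0 then some (true, rs, is)
    else if b then (PySem.Int.ofStr? line).map fun n => (true, rs, is ++ [n])
    else ((PySem.Chars.splitOn line.toList ['-']).mapM PySem.Int.ofChars?).map
      fun r => (b, rs ++ [r], is)

def parse (s : String) : List (List Int) × List Int :=
  match (PySem.Str.splitlines s).foldl parseAStep (some (false, [], [])) with
  | some (_, rs, is) => (rs, is)
  | none => ([], [])            -- unreached under Pre_parse (Python raises ValueError there)

-- ===== PORT B =====
def parse_alt (s : String) : List (List Int) × List Int :=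
  let lines := PySem.Str.splitlines s
  let (before, after) :=
    match PySem.List.index? lines "" with
    | some i => (lines.take i, lines.drop (i + 1))    -- lines[:i], lines[i+1:]
    | none => (lines, ([] : List String))             -- except ValueError
  match before.mapM (fun line => (PySem.Chars.splitOn line.toList ['-']).mapM PySem.Int.ofChars?),
        (after.filter (fun l => !(l == ""))).mapM PySem.Int.ofStr? with
  | some rs, some is => (rs, is)
  | _, _ => ([], [])            -- unreached under Pre_parse

-- ===== PRECONDITION & SPEC =====
-- Pre_parse excludes exactly the inputs on which Python A raises ValueError: some int()
-- call fails (a '-'-split piece of a range line, or an ingredient line, is not an int literal).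
def Pre_parse (s : String) : Prop :=
  let lines := PySem.Str.splitlines s
  let i := (PySem.List.index? lines "").getD lines.length
  (∀ line ∈ lines.take i, ∀ p ∈ PySem.Chars.splitOn line.toList ['-'],
      (PySem.Int.ofChars? p).isSome = true) ∧
  (∀ line ∈ lines.drop (i + 1), line ≠ "" → (PySem.Int.ofStr? line).isSome = true)
instance (s : String) : Decidable (Pre_parse s) := by unfold Pre_parse; infer_instance

def pvWitness_parse : String := "3-5\n10-12\n\n4\n11"

def Spec_parse (s : String) (out : List (List Int) × List Int) : Prop := out = parse_alt s
instance (s : String) (out : List (List Int) × List Int) : Decidable (Spec_parse s out) := by unfold Spec_parse; infer_instance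

-- ===== CLAIM (what is proved, stated in full; the proofs are below) =====
def Claim_equal_parse : Prop := ∀ (s : String), Dom_parse s → Pre_parse s → Spec_parse s (parse s)

-- ===== LEMMAS AND PROOFS =====

theorem foldl_parseAStep_none (ls : List String) : ls.foldl parseAStep none = none := by
  induction ls with
  | nil => rfl
  | cons l t ih => simpa [parseAStep] using ih

theorem str_len_ne_zero {l : String} (hl : l ≠ "") : PySem.Str.len l ≠ 0 := by
  rw [PySem.Str.len_eq]
  simp only [ne_eq, Int.natCast_eq_zero, List.length_eq_zero_iff]
  exact fun h => hl (String.toList_eq_nil_iff.mp h)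

theorem foldl_parseAStep_after (ls : List String) (rs : List (List Int)) (is : List Int) :
    ls.foldl parseAStep (some (true, rs, is)) =
      ((ls.filter (fun l => !(l == ""))).mapM PySem.Int.ofStr?).map fun js => (true, rs, is ++ js) := by
  induction ls generalizing is with
  | nil => simp
  | cons l t ih =>
    by_cases hl : l = ""
    · subst hl
      simpa [parseAStep, PySem.Str.len] using ih is
    · cases hn : PySem.Int.ofStr? l with
      | none =>
        simp [parseAStep, hn, hl, foldl_parseAStep_none, List.mapM_cons]
      | some n =>
        simp only [List.foldl_cons, parseAStep, Option.bind_some, str_len_ne_zero hl, if_false,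
          if_true, hn, Option.map_some, List.filter_cons]
        rw [ih (is ++ [n])]
        simp [List.mapM_cons, hn, hl]
        cases (t.filter (fun l => !(l == ""))).mapM PySem.Int.ofStr? <;> simp

theorem foldl_parseAStep_before (ls : List String) (rs : List (List Int)) :
    ls.foldl parseAStep (some (false, rs, [])) =
      match PySem.List.index? ls "" with
      | some i =>
          ((ls.take i).mapM
              (fun line => (PySem.Chars.splitOn line.toList ['-']).mapM PySem.Int.ofChars?)).bind
            fun bs =>
              (((ls.drop (i + 1)).filter (fun l => !(l == ""))).mapM PySem.Int.ofStr?).map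
                fun js => (true, rs ++ bs, js)
      | none =>
          (ls.mapM (fun line => (PySem.Chars.splitOn line.toList ['-']).mapM PySem.Int.ofChars?)).map
            fun bs => (false, rs ++ bs, ([] : List Int)) := by
  induction ls generalizing rs with
  | nil => simp
  | cons l t ih =>
    by_cases hl : l = ""
    · subst hl
      rw [PySem.List.index?_cons_self]
      simpa [parseAStep, PySem.Str.len] using foldl_parseAStep_after t rs []
    · rw [PySem.List.index?_cons_of_ne t hl]
      cases hp : (PySem.Chars.splitOn l.toList ['-']).mapM PySem.Int.ofChars? with
      | none =>
        cases PySem.List.index? t "" with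
        | none => simp [parseAStep, hl, hp, foldl_parseAStep_none, List.mapM_cons]
        | some j => simp [parseAStep, hl, hp, foldl_parseAStep_none, List.mapM_cons]
      | some r =>
        cases hi : PySem.List.index? t "" with
        | none =>
          have := ih (rs ++ [r])
          rw [hi] at this
          simp only [List.foldl_cons, parseAStep, Option.bind_some, str_len_ne_zero hl, if_false,
            hp, Option.map_some, Bool.false_eq_true]
          rw [this]
          simp [List.mapM_cons, hp]
          cases t.mapM (fun line => (PySem.Chars.splitOn line.toList ['-']).mapM PySem.Int.ofChars?) <;> simp
        | some j =>
          have := ih (rs ++ [r])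
          rw [hi] at this
          simp only [List.foldl_cons, parseAStep, Option.bind_some, str_len_ne_zero hl, if_false,
            hp, Option.map_some, Bool.false_eq_true]
          rw [this]
          simp [List.mapM_cons, hp]
          cases (t.take j).mapM (fun line => (PySem.Chars.splitOn line.toList ['-']).mapM PySem.Int.ofChars?) <;> simp

-- ===== VERDICT (by name: the statement is the Claim_ definition above) =====
theorem parse_spec : Claim_equal_parse := by
  intro s _ _
  unfold Spec_parse parse parse_alt
  rw [foldl_parseAStep_before]
  cases hi : PySem.List.index? (PySem.Str.splitlines s) "" with
  | none =>
    rw [PySem.List.index?_eq_idxOf?] at hi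
    cases hb : (PySem.Str.splitlines s).mapM
        (fun line => (PySem.Chars.splitOn line.toList ['-']).mapM PySem.Int.ofChars?) with
    | none => simp [hi, hb]
    | some bs => simp [hi, hb]
  | some i =>
    rw [PySem.List.index?_eq_idxOf?] at hi
    cases hb : ((PySem.Str.splitlines s).take i).mapM
        (fun line => (PySem.Chars.splitOn line.toList ['-']).mapM PySem.Int.ofChars?) with
    | none => simp [hi, hb]
    | some bs =>
      cases hj : (((PySem.Str.splitlines s).drop (i + 1)).filter (fun l => !(l == ""))).mapM
          PySem.Int.ofStr? with
      | none => simp [hi, hb, hj]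
      | some js => simp [hi, hb, hj]
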